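-- pv_equiv track=rewrite | github.com/abarza/Camino-Ruina | scripts/narrador_nocturno.py | _puntaje_turno
-- ===== SOURCE A (Python) =====
-- def _puntaje_turno(bloque: str) -> int:
--     """Puntúa un turno por relevancia narrativa."""
--     lower = bloque.lower()
--     if any(w in lower for w in ("combate", "atacar", "huir", "herido", "muerto")):
--         return 3
--     if any(w in lower for w in ("hablar", "conversacion", "npc", "hablar_npc")):
--         return 2
--     if any(w in lower for w in ("inventario", "recoger", "comer", "descansar")):
--         return 1
--     return 0
-- ===== SOURCE B (Python) =====
-- _TABLA = {
--     "combate": 3, "atacar": 3, "huir": 3, "herido": 3, "muerto": 3,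
--     "hablar": 2, "conversacion": 2, "npc": 2, "hablar_npc": 2,
--     "inventario": 1, "recoger": 1, "comer": 1, "descansar": 1,
-- }
--
--
-- def _puntaje_turno(bloque: str) -> int:
--     """Puntúa un turno por relevancia narrativa (tabla de palabras clave)."""
--     lower = bloque.lower()
--     return max((score for w, score in _TABLA.items() if w in lower), default=0)
-- ===== Notes on version B (the rewrite author's own statement) =====
-- stated objective: simpler
-- what changed: Replaces the three ordered any()-guarded early returns with a single keyword->score table and one max-over-matches reduction (default 0); strictly larger scores for higher tiers make the max reproduce the tiered precedence.
import Mathlib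
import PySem

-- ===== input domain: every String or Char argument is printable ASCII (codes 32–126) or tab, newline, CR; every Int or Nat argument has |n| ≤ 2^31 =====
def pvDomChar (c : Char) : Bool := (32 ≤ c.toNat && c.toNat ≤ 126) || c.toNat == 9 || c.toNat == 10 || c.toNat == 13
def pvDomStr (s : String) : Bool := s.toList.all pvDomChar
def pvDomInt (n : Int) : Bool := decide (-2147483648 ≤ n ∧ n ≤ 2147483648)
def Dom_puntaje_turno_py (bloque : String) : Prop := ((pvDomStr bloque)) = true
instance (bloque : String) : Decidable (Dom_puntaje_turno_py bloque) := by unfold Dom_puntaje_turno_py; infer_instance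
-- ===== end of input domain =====

-- B replaces A's three ordered any()-guarded early returns by one keyword→score table
-- and a max-over-matches reduction (objective: simpler); return values proved equal on Dom.


-- ===== PORT A =====
def puntaje_turno_py (bloque : String) : Int :=
  let lower := PySem.Str.lower bloque
  if (["combate", "atacar", "huir", "herido", "muerto"].any
      (fun w => PySem.Str.isIn w lower)) then 3
  else if (["hablar", "conversacion", "npc", "hablar_npc"].any
      (fun w => PySem.Str.isIn w lower)) then 2
  else if (["inventario", "recoger", "comer", "descansar"].any
      (fun w => PySem.Str.isIn w lower)) then 1
  else 0

-- ===== PORT B =====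
-- the module-level keyword → score table _TABLA (insertion order)
def tabla_puntaje : List (String × Int) :=
  [("combate", 3), ("atacar", 3), ("huir", 3), ("herido", 3), ("muerto", 3),
   ("hablar", 2), ("conversacion", 2), ("npc", 2), ("hablar_npc", 2),
   ("inventario", 1), ("recoger", 1), ("comer", 1), ("descansar", 1)]

-- max(generator, default=0) ported as a fold of `max` over the matched scores, seeded with 0
-- (exact here: every table score is positive, so the seed 0 is Python's `default=0`).
def puntaje_turno_py_alt (bloque : String) : Int :=
  let lower := PySem.Str.lower bloque
  ((tabla_puntaje.filter (fun p => PySem.Str.isIn p.1 lower)).map Prod.snd).foldl max 0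

-- ===== PRECONDITION & SPEC =====
def Spec_puntaje_turno_py (bloque : String) (out : Int) : Prop := out = puntaje_turno_py_alt bloque
instance (bloque : String) (out : Int) : Decidable (Spec_puntaje_turno_py bloque out) := by unfold Spec_puntaje_turno_py; infer_instance

-- ===== CLAIM (what is proved, stated in full; the proofs are below) =====
def Claim_equal_puntaje_turno_py : Prop := ∀ (bloque : String), Dom_puntaje_turno_py bloque → Spec_puntaje_turno_py bloque (puntaje_turno_py bloque)

-- ===== LEMMAS AND PROOFS =====

-- The table is the three keyword tiers tagged with their scores, concatenated.
theorem tabla_groups :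
    tabla_puntaje =
      (["combate", "atacar", "huir", "herido", "muerto"].map (fun w => (w, (3 : Int))))
      ++ (["hablar", "conversacion", "npc", "hablar_npc"].map (fun w => (w, (2 : Int))))
      ++ (["inventario", "recoger", "comer", "descansar"].map (fun w => (w, (1 : Int)))) := rfl

-- Folding `max` over the matched scores of one constant-score tier bumps the
-- accumulator to `max a s` exactly when some keyword of the tier matches.
theorem fold_tier (f : String → Bool) (s a : Int) (ws : List String) :
    (((ws.map (fun w => (w, s))).filter (fun p => f p.1)).map Prod.snd).foldl max a
      = if ws.any f then max a s else a := by
  induction ws generalizing a with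
  | nil => simp
  | cons w ws ih =>
    simp only [List.map_cons, List.filter_cons, List.any_cons]
    by_cases h : f w
    · by_cases h2 : ws.any f <;> simp [h, h2, ih]
    · simp [h, ih]

theorem puntaje_turno_py_eq_alt (bloque : String) :
    puntaje_turno_py bloque = puntaje_turno_py_alt bloque := by
  unfold puntaje_turno_py puntaje_turno_py_alt
  rw [tabla_groups]
  simp only [List.filter_append, List.map_append, List.foldl_append]
  rw [fold_tier (fun w => PySem.Str.isIn w (PySem.Str.lower bloque)),
      fold_tier (fun w => PySem.Str.isIn w (PySem.Str.lower bloque)),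
      fold_tier (fun w => PySem.Str.isIn w (PySem.Str.lower bloque))]
  generalize (["combate", "atacar", "huir", "herido", "muerto"].any
      (fun w => PySem.Str.isIn w (PySem.Str.lower bloque))) = t3
  generalize (["hablar", "conversacion", "npc", "hablar_npc"].any
      (fun w => PySem.Str.isIn w (PySem.Str.lower bloque))) = t2
  generalize (["inventario", "recoger", "comer", "descansar"].any
      (fun w => PySem.Str.isIn w (PySem.Str.lower bloque))) = t1
  revert t3 t2 t1
  decide

-- ===== VERDICT (by name: the statement is the Claim_ definition above) =====
theorem puntaje_turno_py_spec : Claim_equal_puntaje_turno_py := by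
  intro bloque _
  unfold Spec_puntaje_turno_py
  exact puntaje_turno_py_eq_alt bloque
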